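-- pv_equiv track=rewrite | github.com/Misael-art/WinDeckHelper_RetroSDK | core/dependency_graph_analyzer.py | _generate_resolution_recommendations
-- ===== SOURCE A (Python) =====
-- from typing import List, Dict, Set, Optional, Tuple, Any
--
-- def _generate_resolution_recommendations(results: Dict[str, Any]) -> List[str]:
--     """Generate recommendations based on resolution results."""
--     recommendations = []
--
--     failed_components = [name for name, result in results.items()
--                        if result.get("status") == "failed"]
--     conflict_components = [name for name, result in results.items()
--                          if result.get("status") == "conflicts_found"]
--     no_manager_components = [name for name, result in results.items()
--                            if result.get("status") == "no_manager_detected"]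
--
--     if failed_components:
--         recommendations.append(
--             f"Failed to resolve dependencies for: {', '.join(failed_components)}. "
--             "Check package manager availability and network connectivity."
--         )
--
--     if conflict_components:
--         recommendations.append(
--             f"Dependency conflicts found in: {', '.join(conflict_components)}. "
--             "Review version constraints and consider updating packages."
--         )
--
--     if no_manager_components:
--         recommendations.append(
--             f"No package manager detected for: {', '.join(no_manager_components)}. "
--             "Manual dependency management may be required."
--         )
--
--     if not failed_components and not conflict_components:
--         recommendations.append("All dependencies resolved successfully!")
--
--     return recommendations
-- ===== SOURCE B (Python) =====
-- def _generate_resolution_recommendations(results):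
--     """Generate recommendations based on resolution results."""
--     buckets = {}
--     for name, result in results.items():
--         buckets.setdefault(result.get("status"), []).append(name)
--
--     recommendations = []
--     for status, prefix, suffix in (
--         ("failed", "Failed to resolve dependencies for: ",
--          ". Check package manager availability and network connectivity."),
--         ("conflicts_found", "Dependency conflicts found in: ",
--          ". Review version constraints and consider updating packages."),
--         ("no_manager_detected", "No package manager detected for: ",
--          ". Manual dependency management may be required."),
--     ):
--         names = buckets.get(status, [])
--         if names:
--             recommendations.append(prefix + ", ".join(names) + suffix)
--
--     if not buckets.get("failed", []) and not buckets.get("conflicts_found", []):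
--         recommendations.append("All dependencies resolved successfully!")
--     return recommendations
-- ===== Notes on version B (the rewrite author's own statement) =====
-- stated objective: simpler
-- what changed: B replaces A's three separate list-comprehension scans of results.items() with one grouping pass building a status->names dict, then a table-driven loop over (status, prefix, suffix) triples emits the messages from the buckets.
import Mathlib
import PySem

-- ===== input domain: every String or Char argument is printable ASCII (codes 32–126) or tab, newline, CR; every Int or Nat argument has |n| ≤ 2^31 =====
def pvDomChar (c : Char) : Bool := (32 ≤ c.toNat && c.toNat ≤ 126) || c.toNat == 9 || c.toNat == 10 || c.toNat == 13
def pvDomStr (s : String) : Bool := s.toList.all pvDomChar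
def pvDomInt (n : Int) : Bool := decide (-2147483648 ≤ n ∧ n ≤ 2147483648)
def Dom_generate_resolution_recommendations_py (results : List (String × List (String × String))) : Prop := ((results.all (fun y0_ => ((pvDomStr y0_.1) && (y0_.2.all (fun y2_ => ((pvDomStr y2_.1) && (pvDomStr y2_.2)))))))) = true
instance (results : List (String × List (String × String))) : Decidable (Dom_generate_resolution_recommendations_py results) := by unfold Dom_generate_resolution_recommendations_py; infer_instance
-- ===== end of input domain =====

-- B replaces A's three separate scans of results.items() with one grouping pass
-- (status -> names) plus a table-driven readout of the three buckets (objective: simpler decomposition).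

-- ===== PORT A =====
-- A scans results.items() three times, once per status, then emits the messages.
def generate_resolution_recommendations_py (results : List (String × List (String × String))) : List String :=
  let items := (PySem.Dict.ofList results).items
  let failed_components := (items.filter
      (fun p => (PySem.Dict.ofList p.2).get? "status" == some "failed")).map (·.1)
  let conflict_components := (items.filter
      (fun p => (PySem.Dict.ofList p.2).get? "status" == some "conflicts_found")).map (·.1)
  let no_manager_components := (items.filter
      (fun p => (PySem.Dict.ofList p.2).get? "status" == some "no_manager_detected")).map (·.1)
  let recs : List String := []
  let recs := if failed_components.isEmpty then recs else
    recs ++ ["Failed to resolve dependencies for: " ++ PySem.Str.join ", " failed_components ++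
             ". Check package manager availability and network connectivity."]
  let recs := if conflict_components.isEmpty then recs else
    recs ++ ["Dependency conflicts found in: " ++ PySem.Str.join ", " conflict_components ++
             ". Review version constraints and consider updating packages."]
  let recs := if no_manager_components.isEmpty then recs else
    recs ++ ["No package manager detected for: " ++ PySem.Str.join ", " no_manager_components ++
             ". Manual dependency management may be required."]
  if failed_components.isEmpty && conflict_components.isEmpty then
    recs ++ ["All dependencies resolved successfully!"]
  else recs

-- ===== PORT B =====
-- the (status, prefix, suffix) table Source B iterates over
def pvRecTable : List (String × String × String) :=
  [("failed", "Failed to resolve dependencies for: ",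
    ". Check package manager availability and network connectivity."),
   ("conflicts_found", "Dependency conflicts found in: ",
    ". Review version constraints and consider updating packages."),
   ("no_manager_detected", "No package manager detected for: ",
    ". Manual dependency management may be required.")]

def generate_resolution_recommendations_py_alt (results : List (String × List (String × String))) : List String :=
  let buckets := (PySem.Dict.ofList results).items.foldl
    (fun d p => d.modify ((PySem.Dict.ofList p.2).get? "status") [] (fun l => l ++ [p.1]))
    (PySem.Dict.empty : PySem.Dict (Option String) (List String))
  let recommendations := pvRecTable.foldl (fun recs t =>
    let names := buckets.getD (some t.1) []
    if names.isEmpty then recs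
    else recs ++ [t.2.1 ++ PySem.Str.join ", " names ++ t.2.2]) []
  if (buckets.getD (some "failed") []).isEmpty &&
     (buckets.getD (some "conflicts_found") []).isEmpty then
    recommendations ++ ["All dependencies resolved successfully!"]
  else recommendations

-- ===== PRECONDITION & SPEC =====
def Spec_generate_resolution_recommendations_py (results : List (String × List (String × String))) (out : List String) : Prop := out = generate_resolution_recommendations_py_alt results
instance (results : List (String × List (String × String))) (out : List String) : Decidable (Spec_generate_resolution_recommendations_py results out) := by unfold Spec_generate_resolution_recommendations_py; infer_instance

-- ===== CLAIM (what is proved, stated in full; the proofs are below) =====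
def Claim_equal_generate_resolution_recommendations_py : Prop := ∀ (results : List (String × List (String × String))), Dom_generate_resolution_recommendations_py results → Spec_generate_resolution_recommendations_py results (generate_resolution_recommendations_py results)

-- ===== LEMMAS AND PROOFS =====

-- the grouping fold's bucket for status c is exactly A's filtered name list
theorem pv_bucket_eq (l : List (String × List (String × String))) (c : Option String) :
    (l.foldl (fun d p => d.modify ((PySem.Dict.ofList p.2).get? "status") [] (fun l => l ++ [p.1]))
      (PySem.Dict.empty : PySem.Dict (Option String) (List String))).getD c []
    = (l.filter (fun p => (PySem.Dict.ofList p.2).get? "status" == c)).map (·.1) := by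
  have h := List.foldl_map (f := fun p : String × List (String × String) =>
      ((PySem.Dict.ofList p.2).get? "status", p.1))
    (g := fun (d : PySem.Dict (Option String) (List String)) q => d.modify q.1 [] (fun l => l ++ [q.2]))
    (l := l) (init := (PySem.Dict.empty : PySem.Dict (Option String) (List String)))
  rw [← h, PySem.Dict.getD_foldl_modify_append]
  simp [List.filter_map, Function.comp_def]

-- ===== VERDICT (by name: the statement is the Claim_ definition above) =====
theorem generate_resolution_recommendations_py_spec : Claim_equal_generate_resolution_recommendations_py := by
  intro results _
  show generate_resolution_recommendations_py results
      = generate_resolution_recommendations_py_alt results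
  unfold generate_resolution_recommendations_py generate_resolution_recommendations_py_alt
  simp only [pv_bucket_eq, pvRecTable, List.foldl]
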